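-- pv_equiv track=rewrite | github.com/heeeyi/LibraySystem | IntegratedInterface/Reports.py | concat_arthor
-- ===== SOURCE A (Python) =====
-- def concat_arthor(original_result):
--     output_list = []
--     book_number=[]
--     for row in original_result:
--         if row[0] not in book_number:
--             book_number.append(row[0])
--             output_list.append(list(row))
--         else:
--             output_list[book_number.index(row[0])][2]+=', '+row[2]
--     return output_list
-- ===== SOURCE B (Python) =====
-- def concat_arthor(original_result):
--     # Stateless nested-scan formulation: no running index/group state at all.
--     # A row yields an output record iff it is the first occurrence of its key
--     # (checked by scanning the rows before it); its extra authors are gathered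
--     # by one forward scan over the rows after it.
--     output = []
--     for i, row in enumerate(original_result):
--         key = row[0]
--         if any(r[0] == key for r in original_result[:i]):
--             continue
--         rec = list(row)
--         later = [r[2] for r in original_result[i+1:] if r[0] == key]
--         if later:
--             rec[2] = ', '.join([rec[2]] + later)
--         output.append(rec)
--     return output
-- ===== Notes on version B (the rewrite author's own statement) =====
-- stated objective: alternative
-- what changed: A makes one stateful pass keeping a parallel key-index list and patching already-emitted rows in place; B keeps no running state at all: for each row it decides first-occurrence by a backward scan and gathers all later authors of that key by a forward scan, emitting each output row exactly once with a single join.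
import Mathlib
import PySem

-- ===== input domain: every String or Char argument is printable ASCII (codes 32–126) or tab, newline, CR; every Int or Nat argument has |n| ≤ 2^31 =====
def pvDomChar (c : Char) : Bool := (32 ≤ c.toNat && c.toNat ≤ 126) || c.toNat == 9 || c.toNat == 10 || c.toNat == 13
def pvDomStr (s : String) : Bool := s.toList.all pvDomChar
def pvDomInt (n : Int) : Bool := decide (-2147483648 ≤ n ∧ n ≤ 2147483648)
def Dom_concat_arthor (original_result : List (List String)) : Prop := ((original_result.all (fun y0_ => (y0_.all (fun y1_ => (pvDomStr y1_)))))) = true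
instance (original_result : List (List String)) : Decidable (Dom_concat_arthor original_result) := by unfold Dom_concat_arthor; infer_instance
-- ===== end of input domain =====

-- B replaces A's stateful pass (parallel key-index list, in-place patching of emitted rows) by a
-- stateless nested-scan: a row is emitted iff no earlier row has its key, and its extra authors
-- are collected by one forward scan over the later rows, joined once; same return value on Pre_.

-- ===== PORT A =====
-- loop body of A's single for-loop: state = (output_list, book_number)
def pvStepA (st : List (List String) × List String) (row : List String) :
    List (List String) × List String :=
  if PySem.List.pyGetD row 0 "" ∉ st.2 then
    (st.1 ++ [row], st.2 ++ [PySem.List.pyGetD row 0 ""])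
  else
    let i := (PySem.List.index? st.2 (PySem.List.pyGetD row 0 "")).getD 0
    let r := PySem.List.pyGetD st.1 (i : Int) []
    (PySem.List.pySetD st.1 (i : Int)
      (PySem.List.pySetD r 2
        (PySem.List.pyGetD r 2 "" ++ ", " ++ PySem.List.pyGetD row 2 "")), st.2)

def concat_arthor (original_result : List (List String)) : List (List String) :=
  (original_result.foldl pvStepA ([], [])).1

-- ===== PORT B =====
-- loop body of B's for-loop over enumerate(original_result); 'continue' = return out unchanged
def pvEmitB (rows : List (List String)) (out : List (List String)) (p : Int × List String) :
    List (List String) :=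
  let i := p.1
  let row := p.2
  let key := PySem.List.pyGetD row 0 ""
  if (PySem.List.slice rows none (some i)).any (fun r => PySem.List.pyGetD r 0 "" == key) then
    out
  else
    let later := ((PySem.List.slice rows (some (i + 1)) none).filter
        (fun r => PySem.List.pyGetD r 0 "" == key)).map (fun r => PySem.List.pyGetD r 2 "")
    let rec1 :=
      if later.isEmpty then row
      else PySem.List.pySetD row 2
        (PySem.Str.join ", " (PySem.List.pyGetD row 2 "" :: later))
    out ++ [rec1]

def concat_arthor_alt (original_result : List (List String)) : List (List String) :=
  (PySem.List.enumerate original_result).foldl (pvEmitB original_result) []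

-- ===== PRECONDITION & SPEC =====
-- Exactly the inputs on which the Python A returns: every row must be nonempty (row[0]), and every
-- row whose key occurs at least twice must have at least 3 fields (A reads row[2] of each later
-- occurrence and writes field 2 of the stored first row); otherwise A raises IndexError (B too).
def Pre_concat_arthor (original_result : List (List String)) : Prop :=
  ∀ row ∈ original_result, row ≠ [] ∧
    (2 ≤ original_result.countP
        (fun r => PySem.List.pyGetD r 0 "" == PySem.List.pyGetD row 0 "") →
      3 ≤ row.length)
instance (original_result : List (List String)) : Decidable (Pre_concat_arthor original_result) := by
  unfold Pre_concat_arthor; infer_instance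

def pvWitness_concat_arthor : List (List String) :=
  [["1", "t", "A"], ["1", "t", "B"], ["2", "u", "C"]]

def Spec_concat_arthor (original_result : List (List String)) (out : List (List String)) : Prop :=
  out = concat_arthor_alt original_result
instance (original_result : List (List String)) (out : List (List String)) :
    Decidable (Spec_concat_arthor original_result out) := by
  unfold Spec_concat_arthor; infer_instance

-- ===== CLAIM (what is proved, stated in full; the proofs are below) =====
def Claim_equal_concat_arthor : Prop :=
  ∀ (original_result : List (List String)), Dom_concat_arthor original_result →
    Pre_concat_arthor original_result →
    Spec_concat_arthor original_result (concat_arthor original_result)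

-- ===== LEMMAS AND PROOFS =====

-- Ghost intermediate used only by the proof: group rows as A's state does, key → (first row, later
-- authors), once as a dict fold (close to A's pass) and once as pvGroups (close to B's scans).

-- the row[2] fields of the rows of `rows` whose key is k
def pvLater (rows : List (List String)) (k : String) : List String :=
  (rows.filter (fun r => PySem.List.pyGetD r 0 "" == k)).map (fun r => PySem.List.pyGetD r 2 "")

-- groups of first occurrences, in order, skipping keys already in `seen`
def pvGroups : List (List String) → List String → List (String × (List String × List String))
  | [], _ => []
  | r :: rest, seen =>
    if PySem.List.pyGetD r 0 "" ∈ seen then pvGroups rest seen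
    else (PySem.List.pyGetD r 0 "", (r, pvLater rest (PySem.List.pyGetD r 0 ""))) ::
      pvGroups rest (seen ++ [PySem.List.pyGetD r 0 ""])

-- dict-fold step: key → (first row seen, row[2] of the later occurrences)
def pvGStep (d : PySem.Dict String (List String × List String)) (row : List String) :
    PySem.Dict String (List String × List String) :=
  if d.contains (PySem.List.pyGetD row 0 "") then
    d.modify (PySem.List.pyGetD row 0 "") ([], [])
      (fun p => (p.1, p.2 ++ [PySem.List.pyGetD row 2 ""]))
  else
    d.insert (PySem.List.pyGetD row 0 "") (row, [])

-- build one output row from a group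
def pvBuild (p : List String × List String) : List String :=
  if p.2.isEmpty then p.1
  else
    PySem.List.pySetD p.1 2
      (PySem.Str.join ", " (PySem.List.pyGetD p.1 2 "" :: p.2))

-- joining one string is that string
lemma pv_join_singleton (sep x : String) : PySem.Str.join sep [x] = x := by
  simp [PySem.Str.join, PySem.Chars.join_singleton, String.ofList_toList]

-- ', '.join over a snoc, when the list was nonempty
lemma pv_chars_join_snoc (sep x : List Char) :
    ∀ (l : List (List Char)), l ≠ [] →
      PySem.Chars.join sep (l ++ [x]) = PySem.Chars.join sep l ++ sep ++ x
  | [], h => absurd rfl h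
  | [p], _ => by
      rw [List.singleton_append, PySem.Chars.join_cons_cons, PySem.Chars.join_singleton,
        PySem.Chars.join_singleton]
  | p :: q :: rest, _ => by
      have ih := pv_chars_join_snoc sep x (q :: rest) (by simp)
      rw [List.cons_append, List.cons_append, PySem.Chars.join_cons_cons,
        ← List.cons_append, ih, PySem.Chars.join_cons_cons]
      simp [List.append_assoc]

lemma pv_join_snoc (sep x : String) (l : List String) (h : l ≠ []) :
    PySem.Str.join sep (l ++ [x]) = PySem.Str.join sep l ++ sep ++ x := by
  apply String.toList_inj.mp
  simp only [PySem.Str.join, String.toList_ofList, String.toList_append, List.map_append,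
    List.map_cons, List.map_nil]
  exact pv_chars_join_snoc sep.toList x.toList (l.map String.toList) (by simpa using h)

-- pySetD at the numeral index 2
lemma pv_pySetD_two {α : Type} (xs : List α) (v : α) :
    PySem.List.pySetD xs 2 v = xs.set 2 v := by
  exact_mod_cast PySem.List.pySetD_natCast xs 2 v

-- replacing the (unique) entry with key k is List.set at its index
lemma pv_map_replace_eq_set {ν : Type} :
    ∀ (items : List (String × ν)) (i : Nat) (k : String) (v : ν),
      (items.map Prod.fst).Nodup → (hi : i < items.length) → items[i].1 = k →
      items.map (fun p => if (p.1 == k) = true then (k, v) else p) = items.set i (k, v)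
  | [], i, _, _, _, hi, _ => absurd hi (by simp)
  | p :: rest, 0, k, v, hnd, _, hk => by
      simp only [List.getElem_cons_zero] at hk
      simp only [List.map_cons] at hnd
      obtain ⟨hhead, htail⟩ := List.nodup_cons.mp hnd
      rw [List.map_cons, if_pos (show (p.1 == k) = true by simp [hk]), List.set_cons_zero]
      congr 1
      calc rest.map (fun p => if (p.1 == k) = true then (k, v) else p)
          = rest.map id := List.map_congr_left (by
            intro q hq
            have hqk : q.1 ≠ k := fun h => hhead (hk ▸ h ▸ List.mem_map_of_mem hq)
            simp [hqk])
        _ = rest := List.map_id rest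
  | p :: rest, i + 1, k, v, hnd, hi, hk => by
      simp only [List.getElem_cons_succ] at hk
      simp only [List.map_cons] at hnd
      obtain ⟨hhead, htail⟩ := List.nodup_cons.mp hnd
      have hi' : i < rest.length := by simpa using hi
      have hpk : p.1 ≠ k := fun h =>
        hhead (h ▸ hk ▸ List.mem_map_of_mem (rest.getElem_mem hi'))
      rw [List.map_cons, if_neg (show ¬ (p.1 == k) = true by simpa using hpk),
        List.set_cons_succ]
      congr 1
      exact pv_map_replace_eq_set rest i k v htail hi' hk

-- appending one more author to a group appends ', ' + author to field 2 of the built row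
lemma pv_build_snoc (first : List String) (extras : List String) (a : String)
    (hlen : extras ≠ [] → 3 ≤ first.length) :
    pvBuild (first, extras ++ [a])
      = (pvBuild (first, extras)).set 2
          (PySem.List.pyGetD (pvBuild (first, extras)) 2 "" ++ ", " ++ a) := by
  cases extras with
  | nil =>
      simp only [pvBuild, List.nil_append, List.isEmpty_nil, List.isEmpty_cons, if_true,
        Bool.false_eq_true, if_false]
      rw [pv_pySetD_two]
      have h := pv_join_snoc ", " a [PySem.List.pyGetD first 2 ""] (by simp)
      rw [pv_join_singleton] at h
      show first.set 2 (PySem.Str.join ", " ([PySem.List.pyGetD first 2 ""] ++ [a])) = _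
      rw [h]
  | cons e es =>
      have h3 : 3 ≤ first.length := hlen (by simp)
      simp only [pvBuild, List.cons_append, List.isEmpty_cons, Bool.false_eq_true, if_false]
      rw [pv_pySetD_two, pv_pySetD_two]
      have hget : PySem.List.pyGetD
          (first.set 2 (PySem.Str.join ", " (PySem.List.pyGetD first 2 "" :: e :: es))) 2 ""
          = PySem.Str.join ", " (PySem.List.pyGetD first 2 "" :: e :: es) := by
        rw [PySem.List.pyGetD_ofNat',
          List.getD_eq_getElem _ _ (by simpa using (by omega : 2 < first.length))]
        exact List.getElem_set_self _
      rw [hget, List.set_set]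
      have h := pv_join_snoc ", " a (PySem.List.pyGetD first 2 "" :: e :: es) (by simp)
      show first.set 2 (PySem.Str.join ", " ((PySem.List.pyGetD first 2 "" :: e :: es) ++ [a])) = _
      rw [h]

-- the loop invariant: A's state is the image of the ghost dict
lemma pv_loop_eq :
    ∀ (rows : List (List String)) (d : PySem.Dict String (List String × List String)),
      d.keys.Nodup →
      (∀ p ∈ d.items, p.2.2 ≠ [] → 3 ≤ p.2.1.length) →
      (∀ p ∈ d.items, (∃ r ∈ rows, PySem.List.pyGetD r 0 "" = p.1) → 3 ≤ p.2.1.length) →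
      (∀ r ∈ rows,
        2 ≤ rows.countP (fun s => PySem.List.pyGetD s 0 "" == PySem.List.pyGetD r 0 "") →
        3 ≤ r.length) →
      rows.foldl pvStepA (d.items.map (fun p => pvBuild p.2), d.keys)
        = ((rows.foldl pvGStep d).items.map (fun p => pvBuild p.2), (rows.foldl pvGStep d).keys)
  | [], d, _, _, _, _ => rfl
  | row :: rows, d, hnd, hI1, hI2, hI4 => by
      set k := PySem.List.pyGetD row 0 "" with hkdef
      set a := PySem.List.pyGetD row 2 "" with hadef
      have hI4' : ∀ r ∈ rows,
          2 ≤ rows.countP (fun s => PySem.List.pyGetD s 0 "" == PySem.List.pyGetD r 0 "") →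
          3 ≤ r.length := by
        intro r hr hc
        refine hI4 r (by simp [hr]) ?_
        have := List.countP_cons
          (p := fun s => PySem.List.pyGetD s 0 "" == PySem.List.pyGetD r 0 "") (a := row)
          (l := rows)
        omega
      by_cases hmem : k ∈ d.keys
      · have hcont : d.contains k = true := (PySem.Dict.contains_iff_mem_keys d k).mpr hmem
        obtain ⟨i, hidx⟩ := Option.isSome_iff_exists.mp
          ((PySem.List.index?_isSome_iff d.keys k).mpr hmem)
        obtain ⟨hik, hgk, -⟩ := PySem.List.getElem_of_index?_eq_some hidx
        have hilen : i < d.items.length := by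
          simpa [PySem.Dict.keys] using hik
        have hfst : d.items[i].1 = k := by
          have : (d.items.map Prod.fst)[i] = k := by
            simpa [PySem.Dict.keys] using hgk
          simpa using this
        set first := d.items[i].2.1 with hfirstdef
        set extras := d.items[i].2.2 with hextrasdef
        have hitem : d.items[i] = (k, (first, extras)) := by
          rw [hfirstdef, hextrasdef, ← hfst]
        have hmemitem : (k, (first, extras)) ∈ d.items := hitem ▸ d.items.getElem_mem hilen
        have hflen : 3 ≤ first.length :=
          hI2 (k, (first, extras)) hmemitem ⟨row, by simp, hkdef.symm⟩
        have hgetD : d.getD k ([], []) = (first, extras) :=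
          PySem.Dict.getD_of_mem_items d hmemitem hnd ([], [])
        have hB : pvGStep d row = d.insert k (first, extras ++ [a]) := by
          rw [pvGStep, ← hkdef, ← hadef, if_pos hcont, PySem.Dict.modify, hgetD]
        have hitems : (pvGStep d row).items = d.items.set i (k, (first, extras ++ [a])) := by
          rw [hB, PySem.Dict.items_insert_of_contains d _ hcont]
          exact pv_map_replace_eq_set d.items i k (first, extras ++ [a]) hnd hilen hfst
        have hkeys : (pvGStep d row).keys = d.keys := by
          rw [hB]; exact PySem.Dict.keys_insert_of_contains d _ hcont
        have hbuild := pv_build_snoc first extras a (fun _ => hflen)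
        have houtlen : i < (d.items.map (fun p => pvBuild p.2)).length := by simpa using hilen
        have hr : PySem.List.pyGetD (d.items.map (fun p => pvBuild p.2)) (i : Int) []
            = pvBuild (first, extras) := by
          rw [PySem.List.pyGetD_natCast, List.getD_eq_getElem _ _ houtlen,
            List.getElem_map, hitem]
        have hA : pvStepA (d.items.map (fun p => pvBuild p.2), d.keys) row
            = ((d.items.set i (k, (first, extras ++ [a]))).map (fun p => pvBuild p.2), d.keys) := by
          rw [pvStepA]
          simp only [← hkdef, ← hadef, if_neg (not_not_intro hmem)]
          rw [hidx]
          simp only [Option.getD_some, hr]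
          rw [pv_pySetD_two, PySem.List.pySetD_natCast, List.map_set]
          congr 2
          exact hbuild.symm
        have IH := pv_loop_eq rows (pvGStep d row)
          (by rw [hkeys]; exact hnd)
          (by rw [hitems]
              intro p hp hne
              rcases List.mem_or_eq_of_mem_set hp with hp' | hp'
              · exact hI1 p hp' hne
              · subst hp'; exact hflen)
          (by rw [hitems]
              intro p hp hex
              rcases List.mem_or_eq_of_mem_set hp with hp' | hp'
              · obtain ⟨r, hr1, hr2⟩ := hex
                exact hI2 p hp' ⟨r, by simp [hr1], hr2⟩
              · subst hp'; exact hflen)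
          hI4'
        rw [List.foldl_cons, List.foldl_cons, hA, ← hitems, ← hkeys]
        exact IH
      · have hcont : d.contains k = false := by
          rw [← Bool.not_eq_true, PySem.Dict.contains_iff_mem_keys]; exact hmem
        have hB : pvGStep d row = d.insert k (row, []) := by
          rw [pvGStep, ← hkdef, if_neg (by simp [hcont])]
        have hitems : (pvGStep d row).items = d.items ++ [(k, (row, []))] := by
          rw [hB]; exact PySem.Dict.items_insert_of_not_contains d _ hcont
        have hkeys : (pvGStep d row).keys = d.keys ++ [k] := by
          rw [hB]; exact PySem.Dict.keys_insert_of_not_contains d _ hcont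
        have hbuild : pvBuild (row, ([] : List String)) = row := by
          simp [pvBuild]
        have hmap : (d.items ++ [(k, (row, ([] : List String)))]).map (fun p => pvBuild p.2)
            = d.items.map (fun p => pvBuild p.2) ++ [row] := by
          rw [List.map_append, List.map_cons, List.map_nil, hbuild]
        have hA : pvStepA (d.items.map (fun p => pvBuild p.2), d.keys) row
            = ((d.items ++ [(k, (row, ([] : List String)))]).map (fun p => pvBuild p.2),
                d.keys ++ [k]) := by
          rw [pvStepA]
          simp only [← hkdef, if_pos hmem]
          rw [hmap]
        have hnd' : (pvGStep d row).keys.Nodup := by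
          rw [hB]; exact PySem.Dict.nodup_keys_insert d k _ hnd
        have IH := pv_loop_eq rows (pvGStep d row) hnd'
          (by rw [hitems]
              intro p hp hne
              rcases List.mem_append.mp hp with hp' | hp'
              · exact hI1 p hp' hne
              · simp only [List.mem_singleton] at hp'
                subst hp'; exact absurd rfl hne)
          (by rw [hitems]
              intro p hp hex
              rcases List.mem_append.mp hp with hp' | hp'
              · obtain ⟨r, hr1, hr2⟩ := hex
                exact hI2 p hp' ⟨r, by simp [hr1], hr2⟩
              · simp only [List.mem_singleton] at hp'
                subst hp'
                obtain ⟨r, hr1, hr2⟩ := hex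
                refine hI4 row (by simp) ?_
                have h1 : (fun s => PySem.List.pyGetD s 0 "" == PySem.List.pyGetD row 0 "") row
                    = true := by simp
                have h2 : 0 < rows.countP
                    (fun s => PySem.List.pyGetD s 0 "" == PySem.List.pyGetD row 0 "") := by
                  rw [List.countP_pos_iff]
                  exact ⟨r, hr1, by simp [hr2, ← hkdef]⟩
                have := List.countP_cons
                  (p := fun s => PySem.List.pyGetD s 0 "" == PySem.List.pyGetD row 0 "")
                  (a := row) (l := rows)
                simp only [h1, if_pos] at this
                omega)
          hI4'
        rw [List.foldl_cons, List.foldl_cons, hA, ← hitems, ← hkeys]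
        exact IH

-- the ghost-dict fold produces exactly pvGroups (plus the later authors of the old entries)
lemma pv_gstep_items :
    ∀ (rows : List (List String)) (d : PySem.Dict String (List String × List String)),
      d.keys.Nodup →
      (rows.foldl pvGStep d).items
        = d.items.map (fun p => (p.1, (p.2.1, p.2.2 ++ pvLater rows p.1))) ++ pvGroups rows d.keys
  | [], d, _ => by
      simp [pvGroups, pvLater]
  | row :: rows, d, hnd => by
      set k := PySem.List.pyGetD row 0 "" with hkdef
      set a := PySem.List.pyGetD row 2 "" with hadef
      by_cases hmem : k ∈ d.keys
      · have hcont : d.contains k = true := (PySem.Dict.contains_iff_mem_keys d k).mpr hmem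
        have hB : pvGStep d row
            = d.insert k ((d.getD k ([], [])).1, (d.getD k ([], [])).2 ++ [a]) := by
          rw [pvGStep, ← hkdef, ← hadef, if_pos hcont, PySem.Dict.modify]
        have hitems : (pvGStep d row).items
            = d.items.map (fun p => if (p.1 == k) = true
                then (k, ((d.getD k ([], [])).1, (d.getD k ([], [])).2 ++ [a])) else p) := by
          rw [hB]; exact PySem.Dict.items_insert_of_contains d _ hcont
        have hkeys : (pvGStep d row).keys = d.keys := by
          rw [hB]; exact PySem.Dict.keys_insert_of_contains d _ hcont
        have IH := pv_gstep_items rows (pvGStep d row) (by rw [hkeys]; exact hnd)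
        rw [List.foldl_cons, IH, hkeys, hitems, List.map_map]
        have hgroups : pvGroups (row :: rows) d.keys = pvGroups rows d.keys := by
          rw [pvGroups, ← hkdef, if_pos hmem]
        rw [hgroups]
        congr 1
        apply List.map_congr_left
        intro p hp
        simp only [Function.comp_apply]
        by_cases hpk : p.1 = k
        · have hgetD : d.getD k ([], []) = p.2 := by
            rw [← hpk]
            exact PySem.Dict.getD_of_mem_items d (by simpa using hp) hnd ([], [])
          have hlater : pvLater (row :: rows) k = a :: pvLater rows k := by
            rw [pvLater, pvLater, List.filter_cons,
              if_pos (by simp [← hkdef]), List.map_cons, ← hadef]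
          rw [if_pos (by simp [hpk]), hgetD, hpk, hlater]
          simp [List.append_assoc]
        · have hlater : pvLater (row :: rows) p.1 = pvLater rows p.1 := by
            rw [pvLater, pvLater, List.filter_cons,
              if_neg (by simp only [beq_iff_eq, ← hkdef]; exact fun h => hpk h.symm)]
          rw [if_neg (by simpa using hpk), hlater]
      · have hcont : d.contains k = false := by
          rw [← Bool.not_eq_true, PySem.Dict.contains_iff_mem_keys]; exact hmem
        have hB : pvGStep d row = d.insert k (row, []) := by
          rw [pvGStep, ← hkdef, if_neg (by simp [hcont])]
        have hitems : (pvGStep d row).items = d.items ++ [(k, (row, []))] := by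
          rw [hB]; exact PySem.Dict.items_insert_of_not_contains d _ hcont
        have hkeys : (pvGStep d row).keys = d.keys ++ [k] := by
          rw [hB]; exact PySem.Dict.keys_insert_of_not_contains d _ hcont
        have hnd' : (pvGStep d row).keys.Nodup := by
          rw [hB]; exact PySem.Dict.nodup_keys_insert d k _ hnd
        have IH := pv_gstep_items rows (pvGStep d row) hnd'
        rw [List.foldl_cons, IH, hkeys, hitems]
        have hgroups : pvGroups (row :: rows) d.keys
            = (k, (row, pvLater rows k)) :: pvGroups rows (d.keys ++ [k]) := by
          rw [pvGroups, ← hkdef, if_neg hmem]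
        rw [hgroups, List.map_append]
        have hmap : d.items.map (fun p => (p.1, (p.2.1, p.2.2 ++ pvLater rows p.1)))
            = d.items.map (fun p => (p.1, (p.2.1, p.2.2 ++ pvLater (row :: rows) p.1))) := by
          apply List.map_congr_left
          intro p hp
          have hpk : p.1 ≠ k := fun h =>
            hmem (h ▸ List.mem_map_of_mem (f := Prod.fst) hp)
          have hlater : pvLater (row :: rows) p.1 = pvLater rows p.1 := by
            rw [pvLater, pvLater, List.filter_cons,
              if_neg (by simp only [beq_iff_eq, ← hkdef]; exact fun h => hpk h.symm)]
          rw [hlater]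
        rw [hmap]
        simp [List.append_assoc]

-- B's enumerate fold produces pvGroups mapped through pvBuild
lemma pv_emit_eq :
    ∀ (suf pre out : List (List String)) (seen : List String),
      (∀ k, k ∈ seen ↔ ∃ r ∈ pre, PySem.List.pyGetD r 0 "" = k) →
      (PySem.List.enumerate suf (pre.length : Int)).foldl (pvEmitB (pre ++ suf)) out
        = out ++ (pvGroups suf seen).map (fun p => pvBuild p.2)
  | [], pre, out, seen, _ => by
      simp [pvGroups]
  | row :: rest, pre, out, seen, hseen => by
      set k := PySem.List.pyGetD row 0 "" with hkdef
      have hrows : pre ++ row :: rest = (pre ++ [row]) ++ rest := by simp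
      have hlen1 : ((pre ++ [row]).length : Int) = (pre.length : Int) + 1 := by
        simp
      have htake : PySem.List.slice (pre ++ row :: rest) none (some (pre.length : Int))
          = pre := by
        rw [PySem.List.slice_to_natCast, List.take_left]
      have hdrop : PySem.List.slice (pre ++ row :: rest) (some ((pre.length : Int) + 1)) none
          = rest := by
        rw [hrows, ← hlen1, PySem.List.slice_from_natCast, List.drop_left]
      have hcond : (pre.any (fun r => PySem.List.pyGetD r 0 "" == k)) = decide (k ∈ seen) := by
        by_cases hk : k ∈ seen
        · obtain ⟨r, hr, hrk⟩ := (hseen k).mp hk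
          simp only [hk, decide_true]
          rw [List.any_eq_true]
          exact ⟨r, hr, by simp [hrk]⟩
        · simp only [hk, decide_false]
          rw [List.any_eq_false]
          intro r hr
          simp only [beq_iff_eq]
          exact fun h => hk ((hseen k).mpr ⟨r, hr, h⟩)
      rw [PySem.List.enumerate_cons, List.foldl_cons]
      by_cases hks : k ∈ seen
      · have hstep : pvEmitB (pre ++ row :: rest) out ((pre.length : Int), row) = out := by
          rw [pvEmitB]
          simp only [← hkdef, htake, hcond]
          rw [if_pos (by simpa using hks)]
        have hseen' : ∀ k', k' ∈ seen ↔ ∃ r ∈ pre ++ [row], PySem.List.pyGetD r 0 "" = k' := by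
          intro k'
          rw [hseen k']
          constructor
          · rintro ⟨r, hr, hrk⟩; exact ⟨r, by simp [hr], hrk⟩
          · rintro ⟨r, hr, hrk⟩
            rcases List.mem_append.mp hr with hr' | hr'
            · exact ⟨r, hr', hrk⟩
            · simp only [List.mem_singleton] at hr'
              subst hr'
              obtain ⟨r0, hr0, hr0k⟩ := (hseen k).mp hks
              exact ⟨r0, hr0, hr0k.trans (hkdef.trans hrk)⟩
        have IH := pv_emit_eq rest (pre ++ [row]) out seen hseen'
        rw [hstep, hrows, ← hlen1, IH]
        have : pvGroups (row :: rest) seen = pvGroups rest seen := by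
          rw [pvGroups, ← hkdef, if_pos hks]
        rw [this]
      · have hstep : pvEmitB (pre ++ row :: rest) out ((pre.length : Int), row)
            = out ++ [pvBuild (row, pvLater rest k)] := by
          rw [pvEmitB]
          simp only [← hkdef, htake, hcond, hdrop]
          rw [if_neg (by simpa using hks)]
          rfl
        have hseen' : ∀ k', k' ∈ seen ++ [k]
            ↔ ∃ r ∈ pre ++ [row], PySem.List.pyGetD r 0 "" = k' := by
          intro k'
          constructor
          · intro h
            rcases List.mem_append.mp h with h' | h'
            · obtain ⟨r, hr, hrk⟩ := (hseen k').mp h'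
              exact ⟨r, by simp [hr], hrk⟩
            · simp only [List.mem_singleton] at h'
              exact ⟨row, by simp, by rw [← hkdef, h']⟩
          · rintro ⟨r, hr, hrk⟩
            rcases List.mem_append.mp hr with hr' | hr'
            · exact List.mem_append.mpr (Or.inl ((hseen k').mpr ⟨r, hr', hrk⟩))
            · simp only [List.mem_singleton] at hr'
              subst hr'
              exact List.mem_append.mpr (Or.inr (by simp [← hrk, ← hkdef]))
        have IH := pv_emit_eq rest (pre ++ [row]) (out ++ [pvBuild (row, pvLater rest k)])
          (seen ++ [k]) hseen'
        rw [hstep, hrows, ← hlen1, IH]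
        have : pvGroups (row :: rest) seen
            = (k, (row, pvLater rest k)) :: pvGroups rest (seen ++ [k]) := by
          rw [pvGroups, ← hkdef, if_neg hks]
        rw [this]
        simp [List.append_assoc]

-- ===== VERDICT (by name: the statement is the Claim_ definition above) =====
theorem concat_arthor_spec : Claim_equal_concat_arthor := by
  intro original_result _ hpre
  show concat_arthor original_result = concat_arthor_alt original_result
  rw [concat_arthor, concat_arthor_alt]
  have h := pv_loop_eq original_result PySem.Dict.empty
    (by simp [PySem.Dict.empty, PySem.Dict.keys])
    (by intro p hp; simp [PySem.Dict.empty] at hp)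
    (by intro p hp; simp [PySem.Dict.empty] at hp)
    (fun r hr hc => (hpre r hr).2 hc)
  simp only [PySem.Dict.empty, PySem.Dict.keys, List.map_nil] at h
  rw [h]
  have hg := pv_gstep_items original_result PySem.Dict.empty
    (by simp [PySem.Dict.empty, PySem.Dict.keys])
  simp only [PySem.Dict.empty, PySem.Dict.keys, List.map_nil, List.nil_append] at hg
  rw [hg]
  have he := pv_emit_eq original_result [] [] []
    (by intro k; simp)
  simpa using he.symm
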